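-- pv_equiv track=rewrite | github.com/Kusuma2722/D.K.K.Devika | 1.py | gms
-- ===== SOURCE A (Python) =====
-- def gms(arr, k):
--     max_sum = 0
--     max_subset = []
--
--     for start in range(len(arr)):
--         current_sum = 0
--         current_subset = []
--
--         for end in range(start, min(start + 2 * k + 1, len(arr))):
--             current_sum += arr[end]
--             current_subset.append(arr[end])
--
--         if current_sum > max_sum:
--             max_sum = current_sum
--             max_subset = current_subset
--
--     for element in max_subset:
--         arr.remove(element)
--
--     return max_sum, arr
-- ===== SOURCE B (Python) =====
-- def gms(arr, k):
--     # Returns the same value as the original; does not mutate arr in place.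
--     n = len(arr)
--     w = max(2 * k + 1, 0)
--     prefix = [0]
--     run = 0
--     for x in arr:
--         run += x
--         prefix.append(run)
--     best = 0
--     bi = None
--     for s in range(n):
--         e = min(s + w, n)
--         ssum = prefix[e] - prefix[s]
--         if ssum > best:
--             best = ssum
--             bi = s
--     window = arr[bi:min(bi + w, n)] if bi is not None else []
--     need = {}
--     for x in window:
--         need[x] = need.get(x, 0) + 1
--     kept = []
--     for x in arr:
--         c = need.get(x, 0)
--         if c > 0:
--             need[x] = c - 1
--         else:
--             kept.append(x)
--     return best, kept
-- ===== Notes on version B (the rewrite author's own statement) =====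
-- stated objective: faster
-- what changed: Replaces the O(n*k) rebuild-each-window nested loops with one prefix-sum array giving O(1) window sums in a single argmax pass, and replaces the repeated list.remove scans with a counting-filter pass that removes the window's first occurrences in one sweep; B does not mutate arr in place (return value is identical).
import Mathlib
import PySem

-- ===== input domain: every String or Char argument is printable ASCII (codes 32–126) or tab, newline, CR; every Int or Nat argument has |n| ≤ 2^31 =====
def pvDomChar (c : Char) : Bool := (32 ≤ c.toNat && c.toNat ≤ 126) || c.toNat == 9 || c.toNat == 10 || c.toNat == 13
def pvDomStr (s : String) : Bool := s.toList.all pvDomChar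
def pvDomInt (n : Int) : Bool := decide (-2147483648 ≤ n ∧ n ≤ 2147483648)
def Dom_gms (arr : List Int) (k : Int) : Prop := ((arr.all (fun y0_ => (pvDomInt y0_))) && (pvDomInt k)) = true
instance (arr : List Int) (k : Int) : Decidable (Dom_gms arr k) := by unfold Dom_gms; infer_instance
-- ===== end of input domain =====

-- B replaces the nested window-rebuild loops by a prefix-sum pass and the repeated
-- list.remove scans by a counting filter; B does not mutate arr (return value only).

-- ===== PORT A =====
-- literal port of A: nested loops rebuilding each window, then arr.remove per element.
-- arr[end] is always in range (end < len(arr)), so pyGetD is exact; arr.remove(element)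
-- never raises ValueError (max_subset's elements are drawn from arr with multiplicity),
-- so (remove? …).getD acc is exact.
def gms (arr : List Int) (k : Int) : Int × List Int :=
  let n : Int := arr.length
  let st :=
    (PySem.List.pyRange 0 n 1).foldl
      (fun (st : Int × List Int) start =>
        let cur :=
          (PySem.List.pyRange start (min (start + 2 * k + 1) n) 1).foldl
            (fun (cur : Int × List Int) e =>
              (cur.1 + PySem.List.pyGetD arr e 0, cur.2 ++ [PySem.List.pyGetD arr e 0]))
            (0, [])
        if cur.1 > st.1 then cur else st)
      (0, [])
  let res := st.2.foldl (fun acc e => (PySem.List.remove? acc e).getD acc) arr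
  (st.1, res)

-- ===== PORT B =====
def gms_alt (arr : List Int) (k : Int) : Int × List Int :=
  let n : Int := arr.length
  let w : Int := max (2 * k + 1) 0
  let pr := arr.foldl (fun (p : List Int × Int) x => (p.1 ++ [p.2 + x], p.2 + x)) ([0], 0)
  let pfx := pr.1
  let best :=
    (PySem.List.pyRange 0 n 1).foldl
      (fun (b : Int × Option Int) s =>
        let e := min (s + w) n
        let ssum := PySem.List.pyGetD pfx e 0 - PySem.List.pyGetD pfx s 0
        if ssum > b.1 then (ssum, some s) else b)
      (0, none)
  let window : List Int :=
    match best.2 with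
    | some bi => PySem.List.slice arr (some bi) (some (min (bi + w) n))
    | none => []
  let need := window.foldl (fun (d : PySem.Dict Int Int) x => d.insert x (d.getD x 0 + 1)) PySem.Dict.empty
  let res :=
    arr.foldl
      (fun (st : PySem.Dict Int Int × List Int) x =>
        let c := st.1.getD x 0
        if c > 0 then (st.1.insert x (c - 1), st.2) else (st.1, st.2 ++ [x]))
      (need, [])
  (best.1, res.2)

-- ===== PRECONDITION & SPEC =====
def Spec_gms (arr : List Int) (k : Int) (out : Int × List Int) : Prop := out = gms_alt arr k
instance (arr : List Int) (k : Int) (out : Int × List Int) : Decidable (Spec_gms arr k out) := by unfold Spec_gms; infer_instance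

-- ===== CLAIM (what is proved, stated in full; the proofs are below) =====
def Claim_equal_gms : Prop := ∀ (arr : List Int) (k : Int), Dom_gms arr k → Spec_gms arr k (gms arr k)

-- ===== LEMMAS AND PROOFS =====

def cf : List Int → (Int → Nat) → List Int
  | [], _ => []
  | x :: xs, need =>
    if need x > 0 then cf xs (fun v => if v = x then need x - 1 else need v)
    else x :: cf xs need

theorem cf_zero (xs : List Int) : cf xs (fun _ => 0) = xs := by
  induction xs with
  | nil => rfl
  | cons x xs ih => simp [cf, ih]

theorem cf_congr (xs : List Int) (f g : Int → Nat) (h : ∀ v, f v = g v) :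
    cf xs f = cf xs g := by
  rw [funext h]

theorem cf_inc (xs : List Int) (need : Int → Nat) (w : Int) :
    cf xs (fun v => if v = w then need v + 1 else need v) = cf (xs.erase w) need := by
  induction xs generalizing need with
  | nil => rfl
  | cons x xs ih =>
    by_cases hxw : x = w
    · subst hxw
      rw [List.erase_cons_head]
      simp only [cf, gt_iff_lt, Nat.zero_lt_succ, if_true]
      exact cf_congr xs _ need (by intro v; by_cases hv : v = x <;> simp [hv])
    · rw [show ((x :: xs).erase w) = x :: xs.erase w by simp [hxw]]
      simp only [cf, if_neg hxw, gt_iff_lt]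
      by_cases hx : 0 < need x
      · rw [if_pos hx, if_pos hx]
        rw [cf_congr xs _
          (fun v => if v = w then (fun u => if u = x then need x - 1 else need u) v + 1
                    else (fun u => if u = x then need x - 1 else need u) v)
          (by intro v
              by_cases hv : v = x <;> by_cases hw : v = w <;> simp_all)]
        exact ih _
      · rw [if_neg hx, if_neg hx, ih need]

theorem cf_count (ws : List Int) : ∀ xs : List Int, cf xs (fun v => ws.count v) = xs.diff ws := by
  induction ws with
  | nil => intro xs; simpa using cf_zero xs
  | cons w ws ih =>
    intro xs
    rw [List.diff_cons, ← ih (xs.erase w), ← cf_inc xs (fun v => ws.count v) w]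
    refine cf_congr xs _ _ ?_
    intro v
    by_cases hv : v = w
    · subst hv; simp
    · simp only [if_neg hv]
      exact List.count_cons_of_ne fun a => hv a.symm

theorem removeFold (ws xs : List Int) :
    ws.foldl (fun acc e => (PySem.List.remove? acc e).getD acc) xs = xs.diff ws := by
  calc ws.foldl (fun acc e => (PySem.List.remove? acc e).getD acc) xs
      = ws.foldl (fun acc e => acc.erase e) xs := by
        apply PySem.List.foldl_congr_mem
        intro acc e _
        by_cases h : e ∈ acc
        · rw [PySem.List.remove?_eq_some_erase acc e h]; rfl
        · rw [(PySem.List.remove?_eq_none_iff acc e).2 h, List.erase_of_not_mem h]; rfl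
    _ = xs.diff ws := (List.diff_eq_foldl xs ws).symm

theorem filt_eq (xs : List Int) : ∀ (d : PySem.Dict Int Int) (acc : List Int),
    (xs.foldl (fun (st : PySem.Dict Int Int × List Int) x =>
        let c := st.1.getD x 0
        if c > 0 then (st.1.insert x (c - 1), st.2) else (st.1, st.2 ++ [x])) (d, acc)).2
    = acc ++ cf xs (fun v => (d.getD v 0).toNat) := by
  induction xs with
  | nil => intro d acc; simp [cf]
  | cons x xs ih =>
    intro d acc
    simp only [List.foldl_cons]
    by_cases hc : d.getD x 0 > 0
    · rw [if_pos hc, ih]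
      have hcf : cf (x :: xs) (fun v => (d.getD v 0).toNat)
          = cf xs (fun v => ((d.insert x (d.getD x 0 - 1)).getD v 0).toNat) := by
        simp only [cf, gt_iff_lt, if_pos (show 0 < (d.getD x 0).toNat by omega)]
        apply cf_congr
        intro v
        rw [PySem.Dict.getD_insert]
        by_cases hv : v = x <;> simp [hv]
      rw [hcf]
    · rw [if_neg hc, ih]
      have hcf : cf (x :: xs) (fun v => (d.getD v 0).toNat)
          = x :: cf xs (fun v => (d.getD v 0).toNat) := by
        simp only [cf, gt_iff_lt, if_neg (show ¬ 0 < (d.getD x 0).toNat by omega)]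
      rw [hcf]; simp

theorem map_pyGetD_slice (arr : List Int) (s e : Int) (h0 : 0 ≤ s) (hse : s ≤ e)
    (hen : e ≤ arr.length) :
    (PySem.List.pyRange s e 1).map (fun j => PySem.List.pyGetD arr j 0)
      = PySem.List.slice arr (some s) (some e) := by
  rw [PySem.List.pyRange_one, PySem.List.slice_toNat arr h0 (le_trans h0 hse), List.map_map]
  apply List.ext_getElem
  · simp
    omega
  · intro i hi₁ hi₂
    simp only [List.getElem_map, List.getElem_range, Function.comp_apply,
      List.getElem_take, List.getElem_drop]
    have hlen : i < (e - s).toNat := by simpa using hi₁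
    have hb : s + (i : Int) < (arr.length : Int) := by omega
    rw [PySem.List.pyGetD_eq_getElem arr 0 (by omega) hb]
    congr 1
    omega

theorem inner_eq (arr : List Int) (s e : Int) (h0 : 0 ≤ s) (hse : s ≤ e)
    (hen : e ≤ arr.length) :
    (PySem.List.pyRange s e 1).foldl
      (fun (cur : Int × List Int) j =>
        (cur.1 + PySem.List.pyGetD arr j 0, cur.2 ++ [PySem.List.pyGetD arr j 0]))
      (0, [])
    = ((PySem.List.slice arr (some s) (some e)).sum, PySem.List.slice arr (some s) (some e)) := by
  rw [PySem.List.foldl_prod_mk (f := fun acc j => acc + PySem.List.pyGetD arr j 0)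
    (g := fun acc j => acc ++ [PySem.List.pyGetD arr j 0]),
    PySem.List.foldl_add, PySem.List.foldl_append_singleton_eq_map,
    map_pyGetD_slice arr s e h0 hse hen]
  simp

theorem prefix_fold (xs : List Int) : ∀ (p : List Int) (r : Int),
    xs.foldl (fun (q : List Int × Int) x => (q.1 ++ [q.2 + x], q.2 + x)) (p, r)
    = (p ++ (List.range xs.length).map (fun i => r + (xs.take (i + 1)).sum), r + xs.sum) := by
  induction xs with
  | nil => intro p r; simp
  | cons x xs ih =>
    intro p r
    simp only [List.foldl_cons]
    rw [ih]
    simp only [Prod.mk.injEq]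
    constructor
    · rw [List.length_cons, List.range_succ_eq_map, List.map_cons, List.map_map]
      simp only [List.take_succ_cons, List.sum_cons, List.append_assoc, List.singleton_append]
      congr 2
      · simp
      · apply List.map_congr_left
        intro i _
        simp
        ring
    · simp
      ring

theorem prefix_get (arr : List Int) (i : Int) (h0 : 0 ≤ i) (hn : i ≤ arr.length) :
    PySem.List.pyGetD
      (arr.foldl (fun (q : List Int × Int) x => (q.1 ++ [q.2 + x], q.2 + x)) ([0], 0)).1 i 0
    = (arr.take i.toNat).sum := by
  rw [prefix_fold]
  have hlist : (0 : Int) :: (List.range arr.length).map (fun j => (0 : Int) + (arr.take (j + 1)).sum)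
      = (List.range (arr.length + 1)).map (fun j => (arr.take j).sum) := by
    rw [List.range_succ_eq_map, List.map_cons, List.map_map]
    simp
  simp only [List.singleton_append, hlist]
  have hlt : i < ((List.range (arr.length + 1)).map (fun j => (arr.take j).sum)).length := by
    simp; omega
  rw [PySem.List.pyGetD_eq_getElem _ 0 h0 (by simpa using hlt)]
  simp only [List.getElem_map, List.getElem_range]

theorem slice_sum (arr : List Int) (s e : Int) (h0 : 0 ≤ s) (hse : s ≤ e)
    (_hen : e ≤ arr.length) :
    (PySem.List.slice arr (some s) (some e)).sum
    = (arr.take e.toNat).sum - (arr.take s.toNat).sum := by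
  rw [PySem.List.slice_toNat arr h0 (le_trans h0 hse)]
  have : arr.take e.toNat = arr.take s.toNat ++ (arr.drop s.toNat).take (e.toNat - s.toNat) := by
    rw [← List.take_add]
    congr 1
    omega
  rw [this, List.sum_append]
  ring

theorem foldl_rel {α β γ : Type} (R : α → β → Prop) (l : List γ) (fa : α → γ → α)
    (fb : β → γ → β) :
    ∀ (a : α) (b : β), R a b → (∀ x ∈ l, ∀ a b, R a b → R (fa a x) (fb b x)) →
    R (l.foldl fa a) (l.foldl fb b) := by
  induction l with
  | nil => intro a b h _; exact h
  | cons x l ih =>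
    intro a b h hstep
    simp only [List.foldl_cons]
    exact ih _ _ (hstep x (by simp) a b h) (fun y hy => hstep y (by simp [hy]))

def WA (arr : List Int) (w s : Int) : List Int :=
  PySem.List.slice arr (some s) (some (min (s + w) (arr.length : Int)))

def optW (arr : List Int) (w : Int) (o : Option Int) : List Int :=
  match o with
  | some bi => PySem.List.slice arr (some bi) (some (min (bi + w) (arr.length : Int)))
  | none => []

theorem gms_main (arr : List Int) (k : Int) : gms arr k = gms_alt arr k := by
  have hw0 : (0:Int) ≤ max (2 * k + 1) 0 := le_max_right _ _
  -- canonical steps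
  have hA : (PySem.List.pyRange 0 (arr.length : Int) 1).foldl
      (fun (st : Int × List Int) start =>
        let cur :=
          (PySem.List.pyRange start (min (start + 2 * k + 1) (arr.length : Int)) 1).foldl
            (fun (cur : Int × List Int) e =>
              (cur.1 + PySem.List.pyGetD arr e 0, cur.2 ++ [PySem.List.pyGetD arr e 0]))
            (0, [])
        if cur.1 > st.1 then cur else st) (0, [])
    = (PySem.List.pyRange 0 (arr.length : Int) 1).foldl
      (fun (st : Int × List Int) s =>
        if (WA arr (max (2 * k + 1) 0) s).sum > st.1
        then ((WA arr (max (2 * k + 1) 0) s).sum, WA arr (max (2 * k + 1) 0) s) else st) (0, []) := by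
    apply PySem.List.foldl_congr_mem
    intro acc s hs
    rw [PySem.List.mem_pyRange_one] at hs
    have hinner : (PySem.List.pyRange s (min (s + 2 * k + 1) (arr.length : Int)) 1).foldl
        (fun (cur : Int × List Int) e =>
          (cur.1 + PySem.List.pyGetD arr e 0, cur.2 ++ [PySem.List.pyGetD arr e 0]))
        (0, [])
        = ((WA arr (max (2 * k + 1) 0) s).sum, WA arr (max (2 * k + 1) 0) s) := by
      by_cases hk : 0 ≤ 2 * k + 1
      · rw [WA, max_eq_left hk, show s + (2 * k + 1) = s + 2 * k + 1 by ring]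
        exact inner_eq arr s (min (s + 2 * k + 1) (arr.length : Int)) hs.1 (by omega) (by omega)
      · have hnil : PySem.List.pyRange s (min (s + 2 * k + 1) (arr.length : Int)) 1 = [] :=
          PySem.List.pyRange_one_eq_nil (by omega)
        have hWA : WA arr (max (2 * k + 1) 0) s = [] := by
          rw [WA, max_eq_right (by omega), add_zero, min_eq_left (by omega),
            PySem.List.slice_toNat arr hs.1 hs.1]
          simp
        rw [hnil, hWA]
        simp
    simp only [hinner]
  have hB : (PySem.List.pyRange 0 (arr.length : Int) 1).foldl
      (fun (b : Int × Option Int) s =>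
        let e := min (s + max (2 * k + 1) 0) (arr.length : Int)
        let ssum := PySem.List.pyGetD
          (arr.foldl (fun (p : List Int × Int) x => (p.1 ++ [p.2 + x], p.2 + x)) ([0], 0)).1 e 0
          - PySem.List.pyGetD
          (arr.foldl (fun (p : List Int × Int) x => (p.1 ++ [p.2 + x], p.2 + x)) ([0], 0)).1 s 0
        if ssum > b.1 then (ssum, some s) else b) (0, none)
    = (PySem.List.pyRange 0 (arr.length : Int) 1).foldl
      (fun (b : Int × Option Int) s =>
        if (WA arr (max (2 * k + 1) 0) s).sum > b.1
        then ((WA arr (max (2 * k + 1) 0) s).sum, some s) else b) (0, none) := by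
    apply PySem.List.foldl_congr_mem
    intro acc s hs
    rw [PySem.List.mem_pyRange_one] at hs
    have hsum : PySem.List.pyGetD
          (arr.foldl (fun (p : List Int × Int) x => (p.1 ++ [p.2 + x], p.2 + x)) ([0], 0)).1
          (min (s + max (2 * k + 1) 0) (arr.length : Int)) 0
          - PySem.List.pyGetD
          (arr.foldl (fun (p : List Int × Int) x => (p.1 ++ [p.2 + x], p.2 + x)) ([0], 0)).1 s 0
        = (WA arr (max (2 * k + 1) 0) s).sum := by
      rw [prefix_get arr _ (by omega) (by omega), prefix_get arr s hs.1 (by omega),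
        WA, slice_sum arr s _ hs.1 (by omega) (by omega)]
    simp only [hsum]
  have hrel := foldl_rel
    (fun (a : Int × List Int) (b : Int × Option Int) =>
      a.1 = b.1 ∧ a.2 = optW arr (max (2 * k + 1) 0) b.2)
    (PySem.List.pyRange 0 (arr.length : Int) 1)
    (fun (st : Int × List Int) s =>
        if (WA arr (max (2 * k + 1) 0) s).sum > st.1
        then ((WA arr (max (2 * k + 1) 0) s).sum, WA arr (max (2 * k + 1) 0) s) else st)
    (fun (b : Int × Option Int) s =>
        if (WA arr (max (2 * k + 1) 0) s).sum > b.1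
        then ((WA arr (max (2 * k + 1) 0) s).sum, some s) else b)
    (0, []) (0, none) ⟨rfl, rfl⟩
    (by
      intro s _ a b ⟨h1, h2⟩
      dsimp only
      by_cases hgt : (WA arr (max (2 * k + 1) 0) s).sum > a.1
      · rw [if_pos hgt, if_pos (h1 ▸ hgt)]
        exact ⟨rfl, rfl⟩
      · rw [if_neg hgt, if_neg (h1 ▸ hgt)]
        exact ⟨h1, h2⟩)
  -- removal sides
  have hremA : ∀ (W : List Int),
      W.foldl (fun acc e => (PySem.List.remove? acc e).getD acc) arr = arr.diff W :=
    fun W => removeFold W arr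
  have hremB : ∀ (W : List Int),
      (arr.foldl
        (fun (st : PySem.Dict Int Int × List Int) x =>
          let c := st.1.getD x 0
          if c > 0 then (st.1.insert x (c - 1), st.2) else (st.1, st.2 ++ [x]))
        (W.foldl (fun (d : PySem.Dict Int Int) x => d.insert x (d.getD x 0 + 1)) PySem.Dict.empty,
          [])).2
      = arr.diff W := by
    intro W
    rw [filt_eq, PySem.Dict.foldl_insert_getD_add_one_eq_counter]
    rw [cf_congr arr _ (fun v => W.count v)
      (by intro v; rw [PySem.Dict.getD_counter]; simp)]
    rw [cf_count W arr]
    simp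
  -- assemble
  obtain ⟨h1, h2⟩ := hrel
  simp only [gms, gms_alt]
  rw [hA, hB, h1, h2]
  congr 1
  rw [hremA]
  have hwin : (match (List.foldl
      (fun (b : Int × Option Int) s =>
        if (WA arr (max (2 * k + 1) 0) s).sum > b.1
        then ((WA arr (max (2 * k + 1) 0) s).sum, some s) else b)
      (0, none) (PySem.List.pyRange 0 (arr.length : Int) 1)).2 with
      | some bi => PySem.List.slice arr (some bi) (some (min (bi + max (2 * k + 1) 0) (arr.length : Int)))
      | none => ([] : List Int))
      = optW arr (max (2 * k + 1) 0) (List.foldl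
      (fun (b : Int × Option Int) s =>
        if (WA arr (max (2 * k + 1) 0) s).sum > b.1
        then ((WA arr (max (2 * k + 1) 0) s).sum, some s) else b)
      (0, none) (PySem.List.pyRange 0 (arr.length : Int) 1)).2 := by
    cases (List.foldl
      (fun (b : Int × Option Int) s =>
        if (WA arr (max (2 * k + 1) 0) s).sum > b.1
        then ((WA arr (max (2 * k + 1) 0) s).sum, some s) else b)
      (0, none) (PySem.List.pyRange 0 (arr.length : Int) 1)).2 <;> rfl
  rw [hwin, hremB]

-- ===== VERDICT (by name: the statement is the Claim_ definition above) =====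
theorem gms_spec : Claim_equal_gms := by
  intro arr k _
  unfold Spec_gms
  exact gms_main arr k
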